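-- pv_equiv track=rewrite | github.com/rookinc/hyperxi_lab | scripts/base_edge_pair_relation.py | base_edge_graph
-- ===== SOURCE A (Python) =====
-- def base_edge_graph(edges):
--     """
--     adjacency graph on base edges
--     """
--     adj = {e: set() for e in edges}
--
--     for a in edges:
--         for b in edges:
--             if a == b:
--                 continue
--             if len(set(a) & set(b)) == 1:
--                 adj[a].add(b)
--
--     return adj
-- ===== SOURCE B (Python) =====
-- def _sym_merge(xs, ys):
--     # symmetric difference of two strictly increasing lists, merged in order
--     out = []
--     i = j = 0
--     while i < len(xs) and j < len(ys):
--         if xs[i] == ys[j]: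
--             i += 1
--             j += 1
--         elif xs[i] < ys[j]:
--             out.append(xs[i])
--             i += 1
--         else:
--             out.append(ys[j])
--             j += 1
--     out.extend(xs[i:])
--     out.extend(ys[j:])
--     return out
--
--
-- def base_edge_graph(edges):
--     """
--     adjacency graph on base edges
--     """
--     keys = list(dict.fromkeys(edges))
--     occ = {}  # vertex -> increasing list of key indices of edges touching it
--     for i, e in enumerate(keys):
--         occ.setdefault(e[0], []).append(i)
--         if e[1] != e[0]:
--             occ.setdefault(e[1], []).append(i)
--     result = {}
--     for e in keys:
--         u, v = e
--         if u == v: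
--             nbr = [i for i in occ[u] if keys[i] != e]
--         else:
--             nbr = _sym_merge(occ[u], occ[v])
--         result[e] = {keys[i] for i in nbr}
--     return result
-- ===== Notes on version B (the rewrite author's own statement) =====
-- stated objective: faster
-- what changed: Replaces the all-pairs double loop with per-pair set-intersection tests by a one-pass vertex-to-edge-index map over the deduplicated edge list: each edge's neighbour set is read off as the ordered symmetric-difference merge of the occurrence lists of its two vertices.
import Mathlib
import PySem

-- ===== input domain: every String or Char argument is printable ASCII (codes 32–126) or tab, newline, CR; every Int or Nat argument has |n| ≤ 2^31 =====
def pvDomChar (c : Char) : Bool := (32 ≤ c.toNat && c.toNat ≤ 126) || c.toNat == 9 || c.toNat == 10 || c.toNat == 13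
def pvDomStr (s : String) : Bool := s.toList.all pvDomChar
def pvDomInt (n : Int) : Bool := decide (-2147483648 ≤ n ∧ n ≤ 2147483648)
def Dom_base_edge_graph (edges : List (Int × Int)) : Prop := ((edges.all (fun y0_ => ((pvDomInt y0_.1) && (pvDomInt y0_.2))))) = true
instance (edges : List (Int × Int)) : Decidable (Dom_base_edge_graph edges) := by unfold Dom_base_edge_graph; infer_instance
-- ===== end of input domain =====

-- B replaces A's all-pairs double loop over the edge list by a vertex→edge-index map built in
-- one pass: each edge's neighbours are read off the occurrence lists of its two vertices
-- (symmetric-difference merge), instead of testing every pair of edges.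

-- ===== PORT A =====
-- len(set(a) & set(b)) == 1
def pvCondA (a b : Int × Int) : Bool :=
  PySem.Set.len (PySem.Set.inter (PySem.Set.ofList [a.1, a.2]) [b.1, b.2]) == 1

def base_edge_graph (edges : List (Int × Int)) : List (Int × Int × List (Int × Int)) :=
  -- adj = {e: set() for e in edges}
  let adj0 : PySem.Dict (Int × Int) (PySem.Set (Int × Int)) :=
    edges.foldl (fun d e => d.insert e PySem.Set.empty) PySem.Dict.empty
  -- for a in edges: for b in edges: (skip a == b; if the test holds, adj[a].add(b))
  let adj := edges.foldl (fun d a =>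
    edges.foldl (fun d b =>
      if a == b then d
      else if pvCondA a b then d.modify a PySem.Set.empty (fun s => PySem.Set.add s b)
      else d) d) adj0
  adj.items.map (fun p => (p.1.1, p.1.2, p.2))

-- ===== PORT B =====
-- _sym_merge: two-pointer symmetric difference of two strictly increasing lists
-- (the while-loop with cursors i, j becomes the structural recursion on the two lists;
--  the trailing out.extend(xs[i:]) / out.extend(ys[j:]) are the base cases)
def pvSymMerge : List Nat → List Nat → List Nat
  | [], ys => ys
  | x :: xs, [] => x :: xs
  | x :: xs, y :: ys =>
    if x = y then pvSymMerge xs ys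
    else if x < y then x :: pvSymMerge xs (y :: ys)
    else y :: pvSymMerge (x :: xs) ys
  termination_by xs ys => xs.length + ys.length

def base_edge_graph_alt (edges : List (Int × Int)) : List (Int × Int × List (Int × Int)) :=
  -- keys = list(dict.fromkeys(edges))
  let keys := PySem.List.dedup edges
  -- for i in range(len(keys)): e = keys[i]; occ.setdefault(e[0], []).append(i); …
  -- (range(len(keys)) is 0,…,len-1, ported as List.range; keys[i] with 0 ≤ i < len(keys)
  --  never raises and is exact as keys.getD i (0, 0))
  let occ : PySem.Dict Int (List Nat) :=
    (List.range keys.length).foldl (fun d i =>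
      let e := keys.getD i (0, 0)
      let d := d.modify e.1 [] (fun l => l ++ [i])
      if e.2 != e.1 then d.modify e.2 [] (fun l => l ++ [i]) else d) PySem.Dict.empty
  -- for e in keys: u, v = e; nbr = … ; result[e] = {keys[i] for i in nbr}
  let result : PySem.Dict (Int × Int) (PySem.Set (Int × Int)) :=
    keys.foldl (fun r e =>
      let nbr : List Nat :=
        if e.1 = e.2 then (occ.getD e.1 []).filter (fun i => keys.getD i (0, 0) != e)
        else pvSymMerge (occ.getD e.1 []) (occ.getD e.2 [])
      r.insert e (PySem.Set.ofList (nbr.map (fun i => keys.getD i (0, 0))))) PySem.Dict.empty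
  result.items.map (fun p => (p.1.1, p.1.2, p.2))

-- ===== PRECONDITION & SPEC =====
def Spec_base_edge_graph (edges : List (Int × Int)) (out : List (Int × Int × List (Int × Int))) : Prop := out = base_edge_graph_alt edges
instance (edges : List (Int × Int)) (out : List (Int × Int × List (Int × Int))) : Decidable (Spec_base_edge_graph edges out) := by unfold Spec_base_edge_graph; infer_instance

-- ===== CLAIM (what is proved, stated in full; the proofs are below) =====
def Claim_equal_base_edge_graph : Prop := ∀ (edges : List (Int × Int)), Dom_base_edge_graph edges → Spec_base_edge_graph edges (base_edge_graph edges)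

-- ===== LEMMAS AND PROOFS =====

-- "w is a vertex of edge b"
def pvTouch (w : Int) (b : Int × Int) : Bool := decide (w = b.1 ∨ w = b.2)

-- the common neighbourhood predicate: b and e share exactly one vertex (and b ≠ e)
def pvP (e b : Int × Int) : Bool :=
  if e.1 = e.2 then pvTouch e.1 b && (b != e)
  else pvTouch e.1 b != pvTouch e.2 b

-- the common normal form both ports are reduced to
def pvS (edges : List (Int × Int)) : List (Int × Int × List (Int × Int)) :=
  let K := PySem.Set.ofList edges
  K.map (fun e => (e.1, e.2, K.filter (pvP e)))

theorem pv_ofList_pair (u v : Int) :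
    PySem.Set.ofList [u, v] = if u = v then [u] else [u, v] := by
  by_cases huv : u = v
  · simp [PySem.Set.ofList, PySem.Set.add, PySem.Set.contains, huv]
  · have h2 : ¬ v = u := fun h => huv h.symm
    simp [PySem.Set.ofList, PySem.Set.add, PySem.Set.contains, huv, h2]

theorem pv_condA_eq (e b : Int × Int) :
    (!(e == b) && pvCondA e b) = pvP e b := by
  rcases e with ⟨u, v⟩
  rcases b with ⟨x, y⟩
  simp only [pvCondA, pvP, pvTouch, PySem.Set.len, PySem.Set.inter, pv_ofList_pair]
  by_cases huv : u = v <;> by_cases h1 : u = x <;> by_cases h2 : u = y <;>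
    by_cases h3 : v = x <;> by_cases h4 : v = y <;>
    simp_all [List.filter, PySem.Set.contains, Prod.ext_iff] <;>
    (try simp_all [bne, Prod.ext_iff]) <;> omega

-- ---- A side: the dict-of-sets double loop computes pvS ----

theorem pv_set_update_def {α : Type} [BEq α] (s : PySem.Set α) (xs : List α) :
    PySem.Set.update s xs = xs.foldl PySem.Set.add s := rfl

theorem pv_getD_foldl_modify (l : List (Int × Int)) (a : Int × Int)
    (d : PySem.Dict (Int × Int) (PySem.Set (Int × Int))) (k : Int × Int) :
    ((l.foldl (fun d b => d.modify a PySem.Set.empty (fun s => PySem.Set.add s b)) d).getD k PySem.Set.empty)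
      = if k = a then l.foldl (fun s b => PySem.Set.add s b) (d.getD a PySem.Set.empty)
        else d.getD k PySem.Set.empty := by
  induction l generalizing d with
  | nil => by_cases hk : k = a <;> simp [hk]
  | cons b l ih =>
    simp only [List.foldl_cons, ih, PySem.Dict.getD_modify]
    by_cases hk : k = a <;> simp [hk]

theorem pv_getD_inner (l : List (Int × Int)) (a : Int × Int)
    (d : PySem.Dict (Int × Int) (PySem.Set (Int × Int))) (k : Int × Int) :
    ((l.foldl (fun d b =>
        if a == b then d
        else if pvCondA a b then d.modify a PySem.Set.empty (fun s => PySem.Set.add s b)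
        else d) d).getD k PySem.Set.empty)
      = if k = a then PySem.Set.update (d.getD a PySem.Set.empty) (l.filter (pvP a))
        else d.getD k PySem.Set.empty := by
  have hbody : ∀ (d : PySem.Dict (Int × Int) (PySem.Set (Int × Int))) (b : Int × Int),
      (if a == b then d
        else if pvCondA a b then d.modify a PySem.Set.empty (fun s => PySem.Set.add s b)
        else d)
      = (if pvP a b then d.modify a PySem.Set.empty (fun s => PySem.Set.add s b) else d) := by
    intro d b
    rw [← pv_condA_eq a b]
    by_cases h1 : a = b <;> by_cases h2 : pvCondA a b = true <;> simp [h1, h2]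
  calc (l.foldl (fun d b =>
        if a == b then d
        else if pvCondA a b then d.modify a PySem.Set.empty (fun s => PySem.Set.add s b)
        else d) d).getD k PySem.Set.empty
      = (l.foldl (fun d b =>
          if pvP a b then d.modify a PySem.Set.empty (fun s => PySem.Set.add s b) else d) d).getD k PySem.Set.empty := by
        exact congrArg (fun d => PySem.Dict.getD d k PySem.Set.empty)
          (PySem.List.foldl_congr_mem l _ _ d (fun acc x hx => hbody acc x))
    _ = ((l.filter (pvP a)).foldl (fun d b => d.modify a PySem.Set.empty (fun s => PySem.Set.add s b)) d).getD k PySem.Set.empty := by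
        exact congrArg (fun d => PySem.Dict.getD d k PySem.Set.empty)
          (PySem.List.foldl_if_eq_foldl_filter _ _ _ _)
    _ = _ := by rw [pv_getD_foldl_modify, pv_set_update_def]

theorem pv_update_self {α : Type} [BEq α] [LawfulBEq α] (xs : List α) :
    PySem.Set.update (PySem.Set.ofList xs) xs = PySem.Set.ofList xs := by
  rw [PySem.Set.update_eq_append_filter]
  have : (PySem.Set.ofList xs).filter (fun y => !(PySem.Set.ofList xs).contains y) = [] := by
    rw [List.filter_eq_nil_iff]
    intro a ha
    simp [PySem.Set.contains, ha]
  rw [this, List.append_nil]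

theorem pv_getD_outer (es : List (Int × Int)) (l : List (Int × Int))
    (d : PySem.Dict (Int × Int) (PySem.Set (Int × Int))) (k : Int × Int)
    (h : d.getD k PySem.Set.empty = PySem.Set.empty
       ∨ d.getD k PySem.Set.empty = PySem.Set.ofList (es.filter (pvP k))) :
    ((l.foldl (fun d a => es.foldl (fun d b =>
        if a == b then d
        else if pvCondA a b then d.modify a PySem.Set.empty (fun s => PySem.Set.add s b)
        else d) d) d).getD k PySem.Set.empty)
      = if k ∈ l then PySem.Set.ofList (es.filter (pvP k)) else d.getD k PySem.Set.empty := by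
  induction l generalizing d with
  | nil => simp
  | cons a l ih =>
    simp only [List.foldl_cons]
    set F := fun (d : PySem.Dict (Int × Int) (PySem.Set (Int × Int))) a =>
      es.foldl (fun d b =>
        if a == b then d
        else if pvCondA a b then d.modify a PySem.Set.empty (fun s => PySem.Set.add s b)
        else d) d with hF
    have hFa : (F d a).getD k PySem.Set.empty
        = if k = a then PySem.Set.update (d.getD a PySem.Set.empty) (es.filter (pvP a))
          else d.getD k PySem.Set.empty := pv_getD_inner es a d k
    by_cases hka : k = a
    · subst hka
      have hval : (F d k).getD k PySem.Set.empty = PySem.Set.ofList (es.filter (pvP k)) := by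
        rw [hFa, if_pos rfl]
        rcases h with h | h <;> rw [h]
        · exact PySem.Set.update_empty _
        · exact pv_update_self _
      rw [ih (F d k) (Or.inr hval)]
      by_cases hkl : k ∈ l <;> simp [hkl] <;> exact hval
    · have hun : (F d a).getD k PySem.Set.empty = d.getD k PySem.Set.empty := by
        rw [hFa, if_neg hka]
      rw [ih (F d a) (by rw [hun]; exact h), hun]
      by_cases hkl : k ∈ l <;> simp [hkl, hka, List.mem_cons]

theorem pv_getD_adj0 (l : List (Int × Int)) (d : PySem.Dict (Int × Int) (PySem.Set (Int × Int)))
    (k : Int × Int) (h : d.getD k PySem.Set.empty = PySem.Set.empty) :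
    ((l.foldl (fun d e => d.insert e PySem.Set.empty) d).getD k PySem.Set.empty) = PySem.Set.empty := by
  induction l generalizing d with
  | nil => exact h
  | cons e l ih =>
    refine ih _ ?_
    rw [PySem.Dict.getD_insert]
    by_cases hk : k = e <;> simp only [hk, if_pos, ite_false] <;> exact h

theorem pv_keys_adj0 (l : List (Int × Int)) (d : PySem.Dict (Int × Int) (PySem.Set (Int × Int))) :
    (l.foldl (fun d e => d.insert e PySem.Set.empty) d).keys = PySem.Set.update d.keys l := by
  induction l generalizing d with
  | nil => simp [pv_set_update_def]
  | cons e l ih =>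
    rw [List.foldl_cons, ih, PySem.Set.update_cons]
    congr 1
    by_cases hc : d.contains e = true
    · rw [PySem.Dict.keys_insert_of_contains d _ hc,
        PySem.Set.add_of_mem ((PySem.Dict.contains_iff_mem_keys d e).mp hc)]
    · rw [PySem.Dict.keys_insert_of_not_contains d _ (by simpa using hc),
        PySem.Set.add_of_not_mem]
      intro hmem
      exact hc ((PySem.Dict.contains_iff_mem_keys d e).mpr hmem)

theorem pv_keys_inner (es : List (Int × Int)) (a : Int × Int)
    (d : PySem.Dict (Int × Int) (PySem.Set (Int × Int))) (h : a ∈ d.keys) :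
    (es.foldl (fun d b =>
        if a == b then d
        else if pvCondA a b then d.modify a PySem.Set.empty (fun s => PySem.Set.add s b)
        else d) d).keys = d.keys := by
  induction es generalizing d with
  | nil => rfl
  | cons b es ih =>
    rw [List.foldl_cons]
    by_cases h1 : (a == b) = true
    · rw [if_pos h1, ih d h]
    · rw [if_neg h1]
      by_cases h2 : pvCondA a b = true
      · rw [if_pos h2]
        have hk : (d.modify a PySem.Set.empty (fun s => PySem.Set.add s b)).keys = d.keys := by
          rw [PySem.Dict.keys_modify,
            PySem.Dict.keys_insert_of_contains _ _ ((PySem.Dict.contains_iff_mem_keys d a).mpr h)]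
        rw [ih _ (by rw [hk]; exact h), hk]
      · rw [if_neg h2, ih d h]

theorem pv_keys_outer (es : List (Int × Int)) (l : List (Int × Int))
    (d : PySem.Dict (Int × Int) (PySem.Set (Int × Int))) (h : ∀ a ∈ l, a ∈ d.keys) :
    ((l.foldl (fun d a => es.foldl (fun d b =>
        if a == b then d
        else if pvCondA a b then d.modify a PySem.Set.empty (fun s => PySem.Set.add s b)
        else d) d) d).keys) = d.keys := by
  induction l generalizing d with
  | nil => rfl
  | cons a l ih =>
    rw [List.foldl_cons]
    have hk := pv_keys_inner es a d (h a (List.mem_cons_self))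
    rw [ih _ (fun x hx => by rw [hk]; exact h x (List.mem_cons_of_mem _ hx)), hk]

theorem pv_items_eq {κ ν : Type} [BEq κ] [LawfulBEq κ] (d : PySem.Dict κ ν) (d0 : ν)
    (h : d.keys.Nodup) : d.items = d.keys.map (fun k => (k, d.getD k d0)) := by
  show d.items = (d.items.map (fun p => p.1)).map (fun k => (k, d.getD k d0))
  rw [List.map_map]
  conv_lhs => rw [show d.items = d.items.map id from (List.map_id _).symm]
  refine List.map_congr_left (fun p hp => ?_)
  obtain ⟨k, v⟩ := p
  have : d.getD k d0 = v := PySem.Dict.getD_of_mem_items d hp h d0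
  simp [Function.comp, this]

theorem pv_ofList_filter {α : Type} [BEq α] [LawfulBEq α] (p : α → Bool) (l : List α) :
    PySem.Set.ofList (l.filter p) = (PySem.Set.ofList l).filter p := by
  induction l with
  | nil => rfl
  | cons x xs ih =>
    by_cases hp : p x = true
    · rw [List.filter_cons_of_pos hp, PySem.Set.ofList_cons, PySem.Set.ofList_cons,
        List.filter_cons_of_pos hp, ih]
      congr 1
      simp only [PySem.Set.discard]
      rw [List.filter_comm]
    · rw [List.filter_cons_of_neg (by simp [hp]), PySem.Set.ofList_cons, ih,
        List.filter_cons_of_neg (by simp [hp])]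
      simp only [PySem.Set.discard]
      rw [List.filter_comm]
      refine (List.filter_eq_self.mpr (fun a ha => ?_)).symm
      have hpa := List.of_mem_filter ha
      simp only [Bool.not_eq_eq_eq_not, Bool.not_true, beq_eq_false_iff_ne]
      rintro rfl
      rw [hpa] at hp
      exact hp rfl

theorem pv_A_eq_S (edges : List (Int × Int)) : base_edge_graph edges = pvS edges := by
  unfold base_edge_graph pvS
  simp only []
  set K := PySem.Set.ofList edges with hK
  set adj0 : PySem.Dict (Int × Int) (PySem.Set (Int × Int)) :=
    edges.foldl (fun d e => d.insert e PySem.Set.empty) PySem.Dict.empty with hadj0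
  set adjF := edges.foldl (fun d a =>
    edges.foldl (fun d b =>
      if a == b then d
      else if pvCondA a b then d.modify a PySem.Set.empty (fun s => PySem.Set.add s b)
      else d) d) adj0 with hadjF
  have hkeys0 : adj0.keys = K := by
    rw [hadj0, pv_keys_adj0]
    simp only [PySem.Dict.keys, PySem.Dict.empty, List.map_nil, PySem.Set.update_nil_left]
    exact hK.symm
  have hkeysF : adjF.keys = K := by
    rw [hadjF, pv_keys_outer]
    · exact hkeys0
    · intro a ha
      rw [hkeys0, hK]
      exact (PySem.Set.mem_ofList edges a).mpr ha
  have hnodup : adjF.keys.Nodup := by rw [hkeysF, hK]; exact PySem.Set.nodup_ofList edges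
  have hgetD : ∀ k ∈ K, adjF.getD k PySem.Set.empty = PySem.Set.ofList (edges.filter (pvP k)) := by
    intro k hk
    have h0 : adj0.getD k PySem.Set.empty = PySem.Set.empty := by
      rw [hadj0]
      exact pv_getD_adj0 edges _ k (by simp [PySem.Dict.empty, PySem.Dict.getD, PySem.Dict.get?])
    rw [hadjF, pv_getD_outer edges edges adj0 k (Or.inl h0),
      if_pos ((PySem.Set.mem_ofList edges k).mp hk)]
  rw [pv_items_eq adjF PySem.Set.empty hnodup, hkeysF, List.map_map]
  refine List.map_congr_left (fun k hk => ?_)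
  simp only [Function.comp]
  rw [hgetD k hk, pv_ofList_filter]

-- ---- B side: the vertex-index algorithm computes pvS ----

theorem pv_symMerge_subset (xs ys : List Nat) :
    ∀ a ∈ pvSymMerge xs ys, a ∈ xs ∨ a ∈ ys := by
  fun_induction pvSymMerge xs ys with
  | case1 ys => intro a ha; exact Or.inr ha
  | case2 x xs => intro a ha; exact Or.inl ha
  | case3 xs y ys ih =>
    intro a ha
    rcases ih a ha with h1 | h1
    · exact Or.inl (List.mem_cons_of_mem _ h1)
    · exact Or.inr (List.mem_cons_of_mem _ h1)
  | case4 x xs y ys h hlt ih =>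
    intro a ha
    rcases List.mem_cons.mp ha with rfl | ha
    · exact Or.inl List.mem_cons_self
    · rcases ih a ha with h1 | h1
      · exact Or.inl (List.mem_cons_of_mem _ h1)
      · exact Or.inr h1
  | case5 x xs y ys h hlt ih =>
    intro a ha
    rcases List.mem_cons.mp ha with rfl | ha
    · exact Or.inr List.mem_cons_self
    · rcases ih a ha with h1 | h1
      · exact Or.inl h1
      · exact Or.inr (List.mem_cons_of_mem _ h1)

theorem pv_symMerge_pairwise (xs ys : List Nat) (hx : xs.Pairwise (· < ·))
    (hy : ys.Pairwise (· < ·)) : (pvSymMerge xs ys).Pairwise (· < ·) := by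
  fun_induction pvSymMerge xs ys with
  | case1 ys => exact hy
  | case2 x xs => exact hx
  | case3 xs y ys ih => exact ih hx.tail hy.tail
  | case4 x xs y ys h hlt ih =>
    refine List.Pairwise.cons (fun b hb => ?_) (ih hx.tail hy)
    rcases pv_symMerge_subset _ _ b hb with h1 | h1
    · exact (List.pairwise_cons.mp hx).1 b h1
    · rcases List.mem_cons.mp h1 with rfl | h1
      · exact hlt
      · exact lt_trans hlt ((List.pairwise_cons.mp hy).1 b h1)
  | case5 x xs y ys h hlt ih =>
    have hyx : y < x := by omega
    refine List.Pairwise.cons (fun b hb => ?_) (ih hx hy.tail)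
    rcases pv_symMerge_subset _ _ b hb with h1 | h1
    · rcases List.mem_cons.mp h1 with rfl | h1
      · exact hyx
      · exact lt_trans hyx ((List.pairwise_cons.mp hx).1 b h1)
    · exact (List.pairwise_cons.mp hy).1 b h1

theorem pv_symMerge_mem (xs ys : List Nat) (hx : xs.Pairwise (· < ·))
    (hy : ys.Pairwise (· < ·)) (a : Nat) :
    a ∈ pvSymMerge xs ys ↔ ¬ ((a ∈ xs) ↔ (a ∈ ys)) := by
  fun_induction pvSymMerge xs ys with
  | case1 ys => simp
  | case2 x xs => simp; tauto
  | case3 xs y ys ih =>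
    have hnx : y ∉ xs := fun hm => lt_irrefl y ((List.pairwise_cons.mp hx).1 y hm)
    have hny : y ∉ ys := fun hm => lt_irrefl y ((List.pairwise_cons.mp hy).1 y hm)
    rw [ih hx.tail hy.tail]
    by_cases hax : a = y
    · subst hax; simp [hnx, hny]
    · simp [List.mem_cons, hax]
  | case4 x xs y ys h hlt ih =>
    have hnx : x ∉ xs := fun hm => lt_irrefl x ((List.pairwise_cons.mp hx).1 x hm)
    have hnyy : x ∉ y :: ys := by
      intro hm
      rcases List.mem_cons.mp hm with rfl | hm
      · omega
      · exact absurd ((List.pairwise_cons.mp hy).1 x hm) (by omega)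
    rw [List.mem_cons, ih hx.tail hy]
    by_cases hax : a = x
    · subst hax; simp [hnx, hnyy]
    · simp [List.mem_cons, hax]
  | case5 x xs y ys h hlt ih =>
    have hyx : y < x := by omega
    have hny : y ∉ ys := fun hm => lt_irrefl y ((List.pairwise_cons.mp hy).1 y hm)
    have hnxx : y ∉ x :: xs := by
      intro hm
      rcases List.mem_cons.mp hm with rfl | hm
      · omega
      · exact absurd ((List.pairwise_cons.mp hx).1 y hm) (by omega)
    rw [List.mem_cons, ih hx hy.tail]
    by_cases hay : a = y
    · subst hay; simp [hny, hnxx]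
    · simp [List.mem_cons, hay]

theorem pv_symMerge_filter_range (n : Nat) (p q : Nat → Bool) :
    pvSymMerge ((List.range n).filter p) ((List.range n).filter q)
      = (List.range n).filter (fun i => p i != q i) := by
  have hr := List.pairwise_lt_range (n := n)
  have hp : ((List.range n).filter p).Pairwise (· < ·) := hr.filter p
  have hq : ((List.range n).filter q).Pairwise (· < ·) := hr.filter q
  have hm : (pvSymMerge ((List.range n).filter p) ((List.range n).filter q)).Pairwise (· < ·) :=
    pv_symMerge_pairwise _ _ hp hq
  have ht : ((List.range n).filter (fun i => p i != q i)).Pairwise (· < ·) :=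
    hr.filter _
  refine List.Perm.eq_of_pairwise (fun a b _ _ h1 h2 => Nat.le_antisymm h1 h2)
    (hm.imp le_of_lt) (ht.imp le_of_lt) ?_
  rw [List.perm_ext_iff_of_nodup (hm.imp (fun h => Nat.ne_of_lt h))
    (ht.imp (fun h => Nat.ne_of_lt h))]
  intro a
  rw [pv_symMerge_mem _ _ hp hq]
  simp only [List.mem_filter, List.mem_range]
  by_cases han : a < n <;> by_cases hpa : p a = true <;> by_cases hqa : q a = true <;>
    simp [han, hpa, hqa]

theorem pv_occ_getD (K : List (Int × Int)) (n : Nat) (w : Int) :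
    (((List.range n).foldl (fun d i =>
        if (K.getD i (0, 0)).2 != (K.getD i (0, 0)).1 then
          (d.modify (K.getD i (0, 0)).1 [] (fun l => l ++ [i])).modify
            (K.getD i (0, 0)).2 [] (fun l => l ++ [i])
        else d.modify (K.getD i (0, 0)).1 [] (fun l => l ++ [i]))
      (PySem.Dict.empty : PySem.Dict Int (List Nat))).getD w [])
      = (List.range n).filter (fun i => pvTouch w (K.getD i (0, 0))) := by
  induction n generalizing w with
  | zero => simp [PySem.Dict.empty, PySem.Dict.getD, PySem.Dict.get?]
  | succ n ih =>
    rw [List.range_succ, List.foldl_append, List.foldl_cons, List.foldl_nil, List.filter_append]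
    have hfil : List.filter (fun i => pvTouch w (K.getD i (0, 0))) [n]
        = if pvTouch w (K.getD n (0, 0)) then [n] else [] := by
      rw [List.filter_singleton, Bool.cond_eq_ite]
    rw [hfil]
    set e := K.getD n (0, 0) with he
    by_cases h21 : e.2 = e.1
    · rw [if_neg (by simp [h21])]
      simp only [PySem.Dict.getD_modify]
      by_cases hw1 : w = e.1
      · rw [if_pos hw1, ih e.1, if_pos (by simp [pvTouch, hw1, h21]), hw1]
      · rw [if_neg hw1, ih w, if_neg (by simp [pvTouch, hw1, h21, Ne.symm]), List.append_nil]
    · rw [if_pos (by simp [h21])]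
      simp only [PySem.Dict.getD_modify]
      by_cases hw2 : w = e.2
      · rw [if_pos hw2, if_neg (show ¬ e.2 = e.1 from h21), ih e.2,
          if_pos (by simp [pvTouch, hw2]), hw2]
      · rw [if_neg hw2]
        by_cases hw1 : w = e.1
        · rw [if_pos hw1, ih e.1, if_pos (by simp [pvTouch, hw1]), hw1]
        · rw [if_neg hw1, ih w, if_neg (by simp [pvTouch, hw1, hw2]), List.append_nil]

theorem pv_map_getD_filter_range (p : (Int × Int) → Bool) (K : List (Int × Int)) :
    ((List.range K.length).filter (fun i => p (K.getD i (0, 0)))).map (fun i => K.getD i (0, 0))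
      = K.filter p := by
  induction K with
  | nil => simp
  | cons x T ih =>
    have hsucc : ((fun i => p ((x :: T).getD i (0, 0))) ∘ Nat.succ) = (fun i => p (T.getD i (0, 0))) := by
      funext i; rfl
    have hg : ((fun i => (x :: T).getD i (0, 0)) ∘ Nat.succ) = (fun i => T.getD i (0, 0)) := by
      funext i; rfl
    rw [List.length_cons, List.range_succ_eq_map, List.filter_cons, List.filter_map, hsucc]
    by_cases hp : p x = true
    · rw [if_pos (by simpa using hp), List.map_cons, List.map_map, hg, ih,
        List.filter_cons_of_pos hp]
      rfl
    · rw [if_neg (by simpa using hp), List.map_map, hg, ih,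
        List.filter_cons_of_neg (by simpa using hp)]

theorem pv_result_items (v : (Int × Int) → PySem.Set (Int × Int)) (K : List (Int × Int))
    (d : PySem.Dict (Int × Int) (PySem.Set (Int × Int)))
    (hnd : K.Nodup) (hc : ∀ e ∈ K, d.contains e = false) :
    (K.foldl (fun r e => r.insert e (v e)) d).items = d.items ++ K.map (fun e => (e, v e)) := by
  induction K generalizing d with
  | nil => simp
  | cons x T ih =>
    rw [List.foldl_cons, ih _ hnd.tail (fun e he => ?_),
      PySem.Dict.items_insert_of_not_contains _ _ (hc x List.mem_cons_self)]
    · simp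
    · rw [PySem.Dict.contains_insert]
      have hne : e ≠ x := fun h => (List.nodup_cons.mp hnd).1 (h ▸ he)
      simp [hne, hc e (List.mem_cons_of_mem _ he)]

theorem pv_B_eq_S (edges : List (Int × Int)) : base_edge_graph_alt edges = pvS edges := by
  unfold base_edge_graph_alt pvS
  simp only [PySem.List.dedup]
  set K := PySem.Set.ofList edges with hK
  have hnodup : K.Nodup := PySem.Set.nodup_ofList edges
  set occ : PySem.Dict Int (List Nat) :=
    (List.range K.length).foldl (fun d i =>
      if (K.getD i (0, 0)).2 != (K.getD i (0, 0)).1 then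
        (d.modify (K.getD i (0, 0)).1 [] (fun l => l ++ [i])).modify
          (K.getD i (0, 0)).2 [] (fun l => l ++ [i])
      else d.modify (K.getD i (0, 0)).1 [] (fun l => l ++ [i])) PySem.Dict.empty with hocc
  have hoccD : ∀ w, occ.getD w [] = (List.range K.length).filter (fun i => pvTouch w (K.getD i (0, 0))) :=
    fun w => pv_occ_getD K K.length w
  rw [pv_result_items (fun e => PySem.Set.ofList
        ((if e.1 = e.2 then (occ.getD e.1 []).filter (fun i => K.getD i (0, 0) != e)
          else pvSymMerge (occ.getD e.1 []) (occ.getD e.2 [])).map (fun i => K.getD i (0, 0))))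
      K PySem.Dict.empty hnodup (fun e _ => PySem.Dict.contains_empty e)]
  show ([] ++ K.map _).map _ = _
  rw [List.nil_append, List.map_map]
  refine List.map_congr_left (fun e he => ?_)
  simp only [Function.comp]
  have hval : (if e.1 = e.2 then (occ.getD e.1 []).filter (fun i => K.getD i (0, 0) != e)
        else pvSymMerge (occ.getD e.1 []) (occ.getD e.2 []))
      = (List.range K.length).filter (fun i => pvP e (K.getD i (0, 0))) := by
    by_cases hee : e.1 = e.2
    · rw [if_pos hee, hoccD, List.filter_filter]
      refine List.filter_congr (fun i _ => ?_)
      simp [pvP, hee, Bool.and_comm]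
    · rw [if_neg hee, hoccD, hoccD, pv_symMerge_filter_range]
      refine List.filter_congr (fun i _ => ?_)
      simp [pvP, hee]
  rw [hval, pv_map_getD_filter_range]
  have : (K.filter (pvP e)).Nodup := hnodup.filter _
  rw [PySem.Set.ofList_eq_self_of_nodup _ this]

-- ===== VERDICT (by name: the statement is the Claim_ definition above) =====
theorem base_edge_graph_spec : Claim_equal_base_edge_graph := by
  intro edges _
  show base_edge_graph edges = base_edge_graph_alt edges
  rw [pv_A_eq_S, pv_B_eq_S]
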